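-- pv_equiv track=rewrite | github.com/tsdavid/test_space | kakao_blind/programmers/search/test.py | solution
-- ===== SOURCE A (Python) =====
-- def solution(answers):
-- 	"""점수 = 28.6"""
-- 	answer = []
--
-- 	first, second, third = [[1, 2, 3, 4, 5], [2, 1, 2, 3, 2, 4, 2, 5], [3, 3, 1, 1, 2, 2, 4, 4, 5, 5]]
--
-- 	# 문제 길이 맞추기, 만약 문제가 100개라면, 문제보다 정답을 더 많게해서 문제에 전체 답을 할수 있게, 정답이 남으면 처리하면됨
--
-- 	main_targets = [[lst[0] + 1, 0, lst[1], int(len(answers) / len(lst[1])) + 1] for lst in enumerate([first, second, third])]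
-- 	# targets = [[index, correct, answer_sheet, 정답 길이에 따라 늘어나야할 답안지 수], ]
--
-- 	# 문제 전체를 돌면서 정답과 맞춰보고 맞으면 리스트에 저장
-- 	# 결과를 저장
-- 	for target in main_targets:
-- 		correct = 0
-- 		answer_sheet = target[2] * target[3]
-- 		for seq in range(len(answer_sheet)):
-- 			try:
-- 				if answers[seq] == answer_sheet[seq]:
-- 					correct += 1
-- 			except IndexError:
-- 				break
-- 		target[1] = correct
-- 		if correct == 0:
-- 			target[0] = -1
--
-- 	# 순서 산출
-- 	# 하나도 못 맞추면 리스트에 저장하지 않음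
-- 	# main_targets = sorted(main_targets, key=lambda target: (target[1], -target[0]), reverse=True)
--
-- 	for target in sorted(main_targets, key=lambda target: (target[1], -target[0]), reverse=True):
-- 		if target[0] < 0:
-- 			pass
-- 		else:
-- 			answer.append(target[0])
-- 	return answer
-- ===== SOURCE B (Python) =====
-- def solution(answers):
--     # One pass over answers with modulo indexing into the three fixed patterns,
--     # instead of building multiplied answer sheets and scanning each with try/except.
--     p1 = [1, 2, 3, 4, 5]
--     p2 = [2, 1, 2, 3, 2, 4, 2, 5]
--     p3 = [3, 3, 1, 1, 2, 2, 4, 4, 5, 5]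
--     c1 = c2 = c3 = 0
--     for i, a in enumerate(answers):
--         if a == p1[i % 5]:
--             c1 += 1
--         if a == p2[i % 8]:
--             c2 += 1
--         if a == p3[i % 10]:
--             c3 += 1
--     scores = (c1, c2, c3)
--     return sorted((k for k in (1, 2, 3) if scores[k - 1] > 0),
--                   key=lambda k: -scores[k - 1])
-- ===== Notes on version B (the rewrite author's own statement) =====
-- stated objective: simpler
-- what changed: B makes a single pass over answers keeping three counters indexed by i % pattern-length, then sorts the positive-scoring pattern numbers, instead of A's per-pattern multiplied answer sheets scanned with try/except and a sort of mutated 4-field target records.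
import Mathlib
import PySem

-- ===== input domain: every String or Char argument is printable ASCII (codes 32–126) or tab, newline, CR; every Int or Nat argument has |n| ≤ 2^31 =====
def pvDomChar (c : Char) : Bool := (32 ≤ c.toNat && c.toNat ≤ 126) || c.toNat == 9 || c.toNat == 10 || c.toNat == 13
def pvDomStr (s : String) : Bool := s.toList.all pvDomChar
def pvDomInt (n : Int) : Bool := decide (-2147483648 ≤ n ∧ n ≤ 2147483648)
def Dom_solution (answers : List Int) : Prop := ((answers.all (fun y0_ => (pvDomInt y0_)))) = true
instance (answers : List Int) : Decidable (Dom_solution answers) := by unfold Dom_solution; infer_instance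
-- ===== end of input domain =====

-- B replaces A's multiplied answer sheets + try/except scans by one pass over answers
-- with modulo indexing into the three fixed patterns (objective: simpler).


-- ===== PORT A =====
-- inner loop: 'for seq in range(len(answer_sheet)): try: if answers[seq]==answer_sheet[seq]: correct+=1 except IndexError: break'
def solutionLoop (answers sheet : List Int) (seq : Nat) (correct : Int) : Int :=
  if h : seq < sheet.length then
    match PySem.List.pyGet? answers (seq : Int) with
    | none => correct            -- IndexError on answers[seq] → break
    | some a => solutionLoop answers sheet (seq + 1) (if a = sheet[seq] then correct + 1 else correct)
  else correct
termination_by sheet.length - seq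

def solution (answers : List Int) : List Int :=
  let first : List Int := [1, 2, 3, 4, 5]
  let second : List Int := [2, 1, 2, 3, 2, 4, 2, 5]
  let third : List Int := [3, 3, 1, 1, 2, 2, 4, 4, 5, 5]
  -- target = (lst[0]+1, 0, pattern, int(len(answers)/len(pattern)) + 1); int(a/b) on these nonneg lengths is truncdiv
  let main_targets : List (Int × Int × List Int × Int) :=
    (PySem.List.enumerate [first, second, third]).map
      (fun lst => (lst.1 + 1, (0 : Int), lst.2,
        PySem.Int.truncdiv (answers.length : Int) (lst.2.length : Int) + 1))
  -- mutation loop: target[1] := correct; target[0] := -1 if correct == 0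
  let processed := main_targets.map (fun target =>
    let sheet := PySem.List.pyRepeat target.2.2.1 target.2.2.2
    let correct := solutionLoop answers sheet 0 0
    ((if correct = 0 then (-1 : Int) else target.1), correct, target.2.2.1, target.2.2.2))
  (PySem.List.sorted2 processed (fun t => t.2.1) (fun t => -t.1) true).foldl
    (fun answer t => if t.1 < 0 then answer else answer ++ [t.1]) []

-- ===== PORT B =====
def solution_alt (answers : List Int) : List Int :=
  let p1 : List Int := [1, 2, 3, 4, 5]
  let p2 : List Int := [2, 1, 2, 3, 2, 4, 2, 5]
  let p3 : List Int := [3, 3, 1, 1, 2, 2, 4, 4, 5, 5]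
  let c := (PySem.List.enumerate answers).foldl
    (fun (c : Int × Int × Int) ia =>
      ((if ia.2 = PySem.List.pyGetD p1 (PySem.Int.mod ia.1 5) 0 then c.1 + 1 else c.1),
       (if ia.2 = PySem.List.pyGetD p2 (PySem.Int.mod ia.1 8) 0 then c.2.1 + 1 else c.2.1),
       (if ia.2 = PySem.List.pyGetD p3 (PySem.Int.mod ia.1 10) 0 then c.2.2 + 1 else c.2.2)))
    ((0 : Int), (0 : Int), (0 : Int))
  -- scores[k-1] tuple lookup
  let scores : Int → Int := fun k => if k = 1 then c.1 else if k = 2 then c.2.1 else c.2.2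
  PySem.List.sorted (([1, 2, 3] : List Int).filter (fun k => decide (0 < scores k)))
    (fun k => -(scores k)) false

-- ===== PRECONDITION & SPEC =====
def Spec_solution (answers : List Int) (out : List Int) : Prop := out = solution_alt answers
instance (answers : List Int) (out : List Int) : Decidable (Spec_solution answers out) := by unfold Spec_solution; infer_instance

-- ===== CLAIM (what is proved, stated in full; the proofs are below) =====
def Claim_equal_solution : Prop := ∀ (answers : List Int), Dom_solution answers → Spec_solution answers (solution answers)

-- ===== LEMMAS AND PROOFS =====

-- number of i with answers[i] = pat[(i+off) % len(pat)], the common value of both score loops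
def mcnt (pat : List Int) : List Int → Nat → Int
  | [], _ => 0
  | a :: rest, i => (if a = pat.getD (i % pat.length) 0 then 1 else 0) + mcnt pat rest (i + 1)

theorem getElem_pyRepeatFl (pat : List Int) (k i : Nat)
    (h : i < ((List.replicate k pat).flatten).length) :
    ((List.replicate k pat).flatten)[i] = pat.getD (i % pat.length) 0 := by
  induction k generalizing i with
  | zero => simp at h
  | succ k ih =>
    have hrep : (List.replicate (k+1) pat).flatten = pat ++ (List.replicate k pat).flatten := by
      simp [List.replicate_succ]
    have hL : 0 < pat.length := by
      by_contra hp
      have : pat = [] := List.eq_nil_of_length_eq_zero (by omega)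
      subst this; simp at h
    by_cases hi : i < pat.length
    · have := hrep
      simp [hrep, hi, Nat.mod_eq_of_lt hi, List.getD]
    · have h' : i - pat.length < ((List.replicate k pat).flatten).length := by
        simp [hrep] at h; simp; omega
      have hmod : i % pat.length = (i - pat.length) % pat.length := by
        conv_lhs => rw [show i = (i - pat.length) + pat.length by omega]
        rw [Nat.add_mod_right]
      rw [← Option.some_inj, ← List.getElem?_eq_getElem h, hrep,
        List.getElem?_append_right (by omega), List.getElem?_eq_getElem h',
        ih (i - pat.length) h', hmod]

theorem getElem_pyRepeat (pat : List Int) (n : Int) (i : Nat)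
    (h : i < (PySem.List.pyRepeat pat n).length) :
    (PySem.List.pyRepeat pat n)[i] = pat.getD (i % pat.length) 0 := by
  exact getElem_pyRepeatFl pat n.toNat i h

theorem loop_eq (pat : List Int) (n : Int) (answers : List Int)
    (hlen : answers.length ≤ (PySem.List.pyRepeat pat n).length) :
    ∀ (fuel : Nat) (seq : Nat) (c : Int), answers.length - seq ≤ fuel →
      solutionLoop answers (PySem.List.pyRepeat pat n) seq c
        = c + mcnt pat (answers.drop seq) seq := by
  intro fuel
  induction fuel with
  | zero =>
    intro seq c hf
    have hdrop : answers.drop seq = [] := List.drop_eq_nil_of_le (by omega)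
    rw [solutionLoop]
    split
    · rw [PySem.List.pyGet?_natCast]
      have : answers[seq]? = none := by
        rw [List.getElem?_eq_none_iff]; omega
      simp [this, hdrop, mcnt]
    · simp [hdrop, mcnt]
  | succ fuel ih =>
    intro seq c hf
    by_cases hs : seq < answers.length
    · have hsh : seq < (PySem.List.pyRepeat pat n).length := by omega
      rw [solutionLoop]
      rw [dif_pos hsh, PySem.List.pyGet?_natCast]
      have hget : answers[seq]? = some answers[seq] := List.getElem?_eq_getElem hs
      rw [hget]
      simp only []
      rw [ih (seq + 1) _ (by omega)]
      have hdrop : answers.drop seq = answers[seq] :: answers.drop (seq + 1) :=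
        List.drop_eq_getElem_cons hs
      rw [hdrop, mcnt]
      rw [getElem_pyRepeat pat n seq hsh]
      split <;> ring
    · have hdrop : answers.drop seq = [] := List.drop_eq_nil_of_le (by omega)
      rw [solutionLoop]
      split
      · rw [PySem.List.pyGet?_natCast]
        have : answers[seq]? = none := by rw [List.getElem?_eq_none_iff]; omega
        simp [this, hdrop, mcnt]
      · simp [hdrop, mcnt]

-- B's fold computes the three mcnt values
theorem bfold_eq :
    ∀ (p1 p2 p3 : List Int), p1.length = 5 → p2.length = 8 → p3.length = 10 →
    ∀ (xs : List Int) (i : Nat) (c : Int × Int × Int),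
      (PySem.List.enumerate xs (i : Int)).foldl
        (fun (c : Int × Int × Int) ia =>
          ((if ia.2 = PySem.List.pyGetD p1 (PySem.Int.mod ia.1 5) 0 then c.1 + 1 else c.1),
           (if ia.2 = PySem.List.pyGetD p2 (PySem.Int.mod ia.1 8) 0 then c.2.1 + 1 else c.2.1),
           (if ia.2 = PySem.List.pyGetD p3 (PySem.Int.mod ia.1 10) 0 then c.2.2 + 1 else c.2.2))) c
      = (c.1 + mcnt p1 xs i, c.2.1 + mcnt p2 xs i, c.2.2 + mcnt p3 xs i) := by
  intro p1 p2 p3 hl1 hl2 hl3 xs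
  induction xs with
  | nil => intro i c; simp [PySem.List.enumerate, mcnt]
  | cons a rest ih =>
    intro i c
    rw [PySem.List.enumerate_cons]
    rw [List.foldl_cons]
    have cast1 : (i : Int) + 1 = ((i + 1 : Nat) : Int) := by push_cast; ring
    rw [cast1, ih]
    have m5 : PySem.Int.mod (i : Int) 5 = ((i % 5 : Nat) : Int) := by
      exact_mod_cast PySem.Int.mod_natCast i 5
    have m8 : PySem.Int.mod (i : Int) 8 = ((i % 8 : Nat) : Int) := by
      exact_mod_cast PySem.Int.mod_natCast i 8
    have m10 : PySem.Int.mod (i : Int) 10 = ((i % 10 : Nat) : Int) := by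
      exact_mod_cast PySem.Int.mod_natCast i 10
    simp only [m5, m8, m10, PySem.List.pyGetD_natCast, mcnt, hl1, hl2, hl3]
    split <;> split <;> split
    all_goals try simp_all
    all_goals omega

theorem mcnt_nonneg (pat : List Int) : ∀ (xs : List Int) (i : Nat), 0 ≤ mcnt pat xs i := by
  intro xs
  induction xs with
  | nil => intro i; simp [mcnt]
  | cons a rest ih =>
    intro i
    have := ih (i + 1)
    rw [mcnt]
    split <;> omega

-- the tail computations agree for any nonnegative scores
set_option maxHeartbeats 2000000 in
theorem final_eq (s1 s2 s3 : Int) (r1 r2 r3 : List Int × Int)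
    (h1 : 0 ≤ s1) (h2 : 0 ≤ s2) (h3 : 0 ≤ s3) :
    (PySem.List.sorted2
        [((if s1 = 0 then (-1 : Int) else 1), s1, r1),
         ((if s2 = 0 then (-1 : Int) else 2), s2, r2),
         ((if s3 = 0 then (-1 : Int) else 3), s3, r3)]
        (fun t => t.2.1) (fun t => -t.1) true).foldl
      (fun answer t => if t.1 < 0 then answer else answer ++ [t.1]) []
    = PySem.List.sorted
        (([1, 2, 3] : List Int).filter
          (fun k => decide (0 < (if k = 1 then s1 else if k = 2 then s2 else s3))))
        (fun k => -(if k = 1 then s1 else if k = 2 then s2 else s3)) false := by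
  have hlt1 : (0 < s1) ↔ ¬(s1 = 0) := by omega
  have hlt2 : (0 < s2) ↔ ¬(s2 = 0) := by omega
  have hlt3 : (0 < s3) ↔ ¬(s3 = 0) := by omega
  by_cases e1 : s1 = 0 <;> by_cases e2 : s2 = 0 <;> by_cases e3 : s3 = 0 <;>
    simp_all [PySem.List.sorted2, PySem.List.sorted, PySem.List.insertBy] <;>
    (repeat' (first | rfl | omega | split_ifs | simp_all [PySem.List.insertBy]))

-- ===== VERDICT (by name: the statement is the Claim_ definition above) =====
theorem loop_final (pat : List Int) (hL : 0 < pat.length) (answers : List Int) :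
    solutionLoop answers
      (PySem.List.pyRepeat pat (PySem.Int.truncdiv (answers.length : Int) (pat.length : Int) + 1)) 0 0
    = mcnt pat answers 0 := by
  have htd : PySem.Int.truncdiv (answers.length : Int) (pat.length : Int)
      = ((answers.length / pat.length : Nat) : Int) := by
    simp [PySem.Int.truncdiv]
  have hlen : answers.length ≤
      (PySem.List.pyRepeat pat (PySem.Int.truncdiv (answers.length : Int) (pat.length : Int) + 1)).length := by
    rw [htd]
    have : ((answers.length / pat.length : Nat) : Int) + 1 = ((answers.length / pat.length + 1 : Nat) : Int) := by
      push_cast; ring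
    rw [this]
    simp only [PySem.List.pyRepeat, List.length_flatten, List.map_replicate, List.sum_replicate,
      Int.toNat_natCast, smul_eq_mul]
    have hmd := Nat.mod_add_div answers.length pat.length
    have hml := Nat.mod_lt answers.length hL
    have hr : (answers.length / pat.length + 1) * pat.length
        = pat.length * (answers.length / pat.length) + pat.length := by ring
    omega
  have := loop_eq pat _ answers hlen answers.length 0 0 (by omega)
  simpa using this

theorem bfold0 (answers : List Int) :
    (PySem.List.enumerate answers).foldl
      (fun (c : Int × Int × Int) ia =>
        ((if ia.2 = PySem.List.pyGetD [1, 2, 3, 4, 5] (PySem.Int.mod ia.1 5) 0 then c.1 + 1 else c.1),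
         (if ia.2 = PySem.List.pyGetD [2, 1, 2, 3, 2, 4, 2, 5] (PySem.Int.mod ia.1 8) 0 then c.2.1 + 1 else c.2.1),
         (if ia.2 = PySem.List.pyGetD [3, 3, 1, 1, 2, 2, 4, 4, 5, 5] (PySem.Int.mod ia.1 10) 0 then c.2.2 + 1 else c.2.2)))
      ((0 : Int), (0 : Int), (0 : Int))
    = (mcnt [1, 2, 3, 4, 5] answers 0, mcnt [2, 1, 2, 3, 2, 4, 2, 5] answers 0,
       mcnt [3, 3, 1, 1, 2, 2, 4, 4, 5, 5] answers 0) := by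
  have h := bfold_eq [1, 2, 3, 4, 5] [2, 1, 2, 3, 2, 4, 2, 5] [3, 3, 1, 1, 2, 2, 4, 4, 5, 5]
    rfl rfl rfl answers 0 (0, 0, 0)
  have h0 : ((0 : Nat) : Int) = (0 : Int) := rfl
  rw [h0] at h
  simpa using h

theorem solution_spec : Claim_equal_solution := by
  intro answers _
  unfold Spec_solution solution solution_alt
  simp only [PySem.List.enumerate_cons, PySem.List.enumerate_nil, List.map_cons, List.map_nil]
  rw [loop_final [1, 2, 3, 4, 5] (by norm_num) answers,
    loop_final [2, 1, 2, 3, 2, 4, 2, 5] (by norm_num) answers,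
    loop_final [3, 3, 1, 1, 2, 2, 4, 4, 5, 5] (by norm_num) answers]
  rw [bfold0 answers]
  simp only []
  rw [show (0 : Int) + 1 = 1 by ring, show (1 : Int) + 1 = 2 by ring, show (2 : Int) + 1 = 3 by ring]
  exact final_eq _ _ _ _ _ _ (mcnt_nonneg _ answers 0) (mcnt_nonneg _ answers 0)
    (mcnt_nonneg _ answers 0)
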